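-- pv_equiv track=rewrite | github.com/gEoNNNN/LFA | LAB1/test.py | check_nfa
-- ===== SOURCE A (Python) =====
-- def check_nfa(input_dict):
--     check = False
--     for _, strings in input_dict.items():
--         first_letters = [string[0] for string in strings if string]
--         if len(set(first_letters)) < len(first_letters):
--             check = True
--             break
--     return check
-- ===== SOURCE B (Python) =====
-- def check_nfa(input_dict):
--     for strings in input_dict.values():
--         letters = sorted(s[0] for s in strings if s)
--         for a, b in zip(letters, letters[1:]):
--             if a == b:
--                 return True
--     return False
-- ===== Notes on version B (the rewrite author's own statement) =====
-- stated objective: alternative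
-- what changed: Per group B sorts the first letters and scans adjacent pairs for an equal neighbour (sort-then-adjacent-scan with early return), instead of A's build-list-then-compare len(set) with len.
import Mathlib
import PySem

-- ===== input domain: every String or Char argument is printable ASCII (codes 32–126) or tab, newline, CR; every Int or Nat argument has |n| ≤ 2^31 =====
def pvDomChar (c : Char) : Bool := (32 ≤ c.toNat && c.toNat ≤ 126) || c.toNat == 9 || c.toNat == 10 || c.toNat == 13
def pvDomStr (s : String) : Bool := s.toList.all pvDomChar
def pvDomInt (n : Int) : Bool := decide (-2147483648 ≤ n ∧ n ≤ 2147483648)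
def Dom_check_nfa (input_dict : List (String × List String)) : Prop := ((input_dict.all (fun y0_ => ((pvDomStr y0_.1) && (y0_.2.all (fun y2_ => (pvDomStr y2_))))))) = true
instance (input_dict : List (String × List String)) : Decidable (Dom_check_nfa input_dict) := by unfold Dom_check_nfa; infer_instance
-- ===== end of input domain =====

-- ===== PORT A =====
-- B replaces A's per-group len(set(first_letters)) < len(first_letters) test by sorting the
-- first letters and scanning adjacent pairs for an equal neighbour (objective: alternative).
-- A's loop with `break`; `[string[0] for string in strings if string]` is the filterMap of the head char.
def check_nfa_loop : List (String × List String) → Bool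
  | [] => false
  | (_, strings) :: rest =>
      let first_letters := strings.filterMap (fun s => s.toList.head?)
      if (PySem.Set.ofList first_letters).length < first_letters.length then true
      else check_nfa_loop rest

def check_nfa (input_dict : List (String × List String)) : Bool :=
  check_nfa_loop input_dict

-- ===== PORT B =====
-- inner loop of B: `for a, b in zip(letters, letters[1:]): if a == b: return True`
def hasAdjEq : List Char → Bool
  | a :: b :: rest => if a == b then true else hasAdjEq (b :: rest)
  | _ => false

def check_nfa_alt : List (String × List String) → Bool
  | [] => false
  | (_, strings) :: rest =>
      let letters := PySem.List.sorted (strings.filterMap (fun s => s.toList.head?)) (fun c => c) false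
      if hasAdjEq letters then true else check_nfa_alt rest

-- ===== PRECONDITION & SPEC =====
def Spec_check_nfa (input_dict : List (String × List String)) (out : Bool) : Prop := out = check_nfa_alt input_dict
instance (input_dict : List (String × List String)) (out : Bool) : Decidable (Spec_check_nfa input_dict out) := by unfold Spec_check_nfa; infer_instance

-- ===== CLAIM (what is proved, stated in full; the proofs are below) =====
def Claim_equal_check_nfa : Prop := ∀ (input_dict : List (String × List String)), Dom_check_nfa input_dict → Spec_check_nfa input_dict (check_nfa input_dict)

-- ===== LEMMAS AND PROOFS =====

lemma len_ofList_eq_iff {α : Type} [BEq α] [LawfulBEq α] (l : List α) :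
    (PySem.Set.ofList l).length = l.length ↔ l.Nodup := by
  induction l with
  | nil => simp [PySem.Set.ofList_nil]
  | cons x xs ih =>
    rw [PySem.Set.ofList_cons]
    by_cases hx : x ∈ xs
    · have hmem : x ∈ PySem.Set.ofList xs := (PySem.Set.mem_ofList xs x).mpr hx
      have hlt : ((PySem.Set.ofList xs).discard x).length < (PySem.Set.ofList xs).length := by
        unfold PySem.Set.discard
        exact List.length_filter_lt_length_iff_exists.mpr ⟨x, hmem, by simp⟩
      have hle := PySem.Set.length_ofList_le (xs := xs)
      simp only [List.length_cons, List.nodup_cons]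
      constructor
      · intro h; omega
      · intro h; exact absurd hx h.1
    · have hd : (PySem.Set.ofList xs).discard x = PySem.Set.ofList xs := by
        unfold PySem.Set.discard
        apply List.filter_eq_self.mpr
        intro y hy
        have : y ∈ xs := (PySem.Set.mem_ofList xs y).mp hy
        simp; rintro rfl; exact hx this
      rw [hd]
      simp [List.nodup_cons, hx, ih]

lemma len_ofList_lt_iff {α : Type} [BEq α] [LawfulBEq α] (l : List α) :
    (PySem.Set.ofList l).length < l.length ↔ ¬ l.Nodup := by
  have hle := PySem.Set.length_ofList_le (xs := l)
  have he := len_ofList_eq_iff l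
  constructor
  · intro h hn; rw [← he] at hn; omega
  · intro h
    rcases Nat.lt_or_ge (PySem.Set.ofList l).length l.length with h' | h'
    · exact h'
    · exact absurd (he.mp (Nat.le_antisymm hle h')) h

-- on a ≤-sorted list, an adjacent equal pair exists iff the list has a duplicate
lemma hasAdjEq_iff_not_nodup (l : List Char) (h : l.Pairwise (· ≤ ·)) :
    hasAdjEq l = true ↔ ¬ l.Nodup := by
  induction l with
  | nil => simp [hasAdjEq]
  | cons a t ih =>
    cases t with
    | nil => simp [hasAdjEq]
    | cons b rest =>
      rcases List.pairwise_cons.mp h with ⟨hab, htail⟩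
      by_cases heq : a = b
      · subst heq
        simp [hasAdjEq, List.nodup_cons]
      · have hlt : a < b := lt_of_le_of_ne (hab b (by simp)) heq
        have hnotmem : a ∉ b :: rest := by
          intro hm
          rcases List.mem_cons.mp hm with rfl | hm
          · exact heq rfl
          · have hble := (List.pairwise_cons.mp htail).1 a hm
            exact absurd (lt_of_lt_of_le hlt hble) (lt_irrefl a)
        have : hasAdjEq (a :: b :: rest) = hasAdjEq (b :: rest) := by
          simp [hasAdjEq, heq]
        rw [this, ih htail]
        simp [List.nodup_cons, hnotmem]

lemma group_cond_eq (strings : List String) :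
    (decide ((PySem.Set.ofList (strings.filterMap (fun s => s.toList.head?))).length
        < (strings.filterMap (fun s => s.toList.head?)).length))
      = hasAdjEq (PySem.List.sorted (strings.filterMap (fun s => s.toList.head?)) (fun c => c) false) := by
  set fl := strings.filterMap (fun s => s.toList.head?) with hfl
  have hperm : (PySem.List.sorted fl (fun c => c) false).Perm fl := PySem.List.sorted_perm fl (fun c => c) false
  have hpw : (PySem.List.sorted fl (fun c => c) false).Pairwise (· ≤ ·) :=
    PySem.List.sorted_pairwise (xs := fl) (key := fun c => c)
  have hiff := hasAdjEq_iff_not_nodup _ hpw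
  rw [hperm.nodup_iff] at hiff
  rcases h : hasAdjEq (PySem.List.sorted fl (fun c => c) false) with _ | _
  · have : fl.Nodup := by
      by_contra hn
      exact absurd (hiff.mpr hn) (by rw [h]; simp)
    simp [len_ofList_lt_iff, this]
  · simp [len_ofList_lt_iff, hiff.mp h]

lemma loop_eq_alt (l : List (String × List String)) : check_nfa_loop l = check_nfa_alt l := by
  induction l with
  | nil => rfl
  | cons p rest ih =>
    obtain ⟨k, strings⟩ := p
    simp only [check_nfa_loop, check_nfa_alt]
    rw [← group_cond_eq]
    by_cases h : (PySem.Set.ofList (strings.filterMap (fun s => s.toList.head?))).length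
        < (strings.filterMap (fun s => s.toList.head?)).length
    · simp [h]
    · simp [h, ih]

-- ===== VERDICT (by name: the statement is the Claim_ definition above) =====
theorem check_nfa_spec : Claim_equal_check_nfa := by
  intro input_dict _
  unfold Spec_check_nfa check_nfa
  exact loop_eq_alt input_dict
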